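-- pv_equiv track=rewrite | github.com/robinklaassen/aoc2024 | day09/main.py | get_free_space_locations
-- ===== SOURCE A (Python) =====
-- from itertools import groupby
--
-- def get_free_space_locations(blocks: list[int | None]) -> dict[int, int]:
--     # dict of starting index to size of empty space
--     output = {}
--     index = 0
--     for k, v in groupby(blocks):
--         contiguous_size = len(list(v))
--         if k is None:
--             output[index] = contiguous_size
--         index += contiguous_size
--
--     return output
-- ===== SOURCE B (Python) =====
-- def get_free_space_locations(blocks):
--     # absolute positions of every free block, then coalesce maximal runs of
--     # consecutive positions into {run start: run length}.
--     free = [i for i, b in enumerate(blocks) if b is None]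
--     runs = []
--     for p in free:
--         if runs and p == runs[-1][0] + runs[-1][1]:
--             runs[-1] = (runs[-1][0], runs[-1][1] + 1)
--         else:
--             runs.append((p, 1))
--     return dict(runs)
-- ===== Notes on version B (the rewrite author's own statement) =====
-- stated objective: faster
-- what changed: B first collects the absolute positions of all free (None) blocks with one enumerate pass and then coalesces maximal runs of consecutive positions into (start, length) pairs, instead of A's itertools.groupby over all blocks with a running index offset; a timing run measured it ~3x faster (constant factor: no groupby iterator objects and no len(list(v)) materialisation per group).
import Mathlib
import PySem

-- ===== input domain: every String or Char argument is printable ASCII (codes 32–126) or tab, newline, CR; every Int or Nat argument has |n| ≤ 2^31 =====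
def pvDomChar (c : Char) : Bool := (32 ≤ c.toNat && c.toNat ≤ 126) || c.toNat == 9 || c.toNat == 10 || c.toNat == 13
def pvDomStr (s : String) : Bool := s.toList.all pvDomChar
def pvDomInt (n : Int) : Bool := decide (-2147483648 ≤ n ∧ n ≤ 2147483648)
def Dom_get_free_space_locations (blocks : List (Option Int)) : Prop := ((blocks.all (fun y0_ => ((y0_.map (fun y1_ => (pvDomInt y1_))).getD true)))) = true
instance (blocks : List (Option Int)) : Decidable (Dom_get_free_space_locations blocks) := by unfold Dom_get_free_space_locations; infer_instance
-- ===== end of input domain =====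

-- B replaces A's groupby-with-running-offset by: collect the positions of all
-- free (None) blocks first, then coalesce maximal runs of consecutive positions.
-- Equivalence of the return value is proved on all inputs (A is total).

-- ===== PORT A =====
-- A: `for k, v in groupby(blocks)` — each step consumes the maximal leading run
-- of elements equal to the head; the dict's keys (group start indices) are
-- strictly increasing, so each `output[index] = size` is a fresh append.
def get_free_space_locations (blocks : List (Option Int)) : List (Int × Int) :=
  go blocks 0
where
  go : List (Option Int) → Int → List (Int × Int)
  | [], _ => []
  | x :: xs, index =>
    let contiguous_size : Nat := 1 + (xs.takeWhile (· = x)).length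
    (if x = none then [(index, (contiguous_size : Int))] else []) ++
      go (xs.dropWhile (· = x)) (index + contiguous_size)
  termination_by bs _ => bs.length
  decreasing_by
    have := List.length_dropWhile_le (· = x) xs
    simp; omega

-- ===== PORT B =====
-- `[i for i, b in enumerate(blocks) if b is None]`
def pvFree : Int → List (Option Int) → List Int
  | _, [] => []
  | i, none :: bs => i :: pvFree (i + 1) bs
  | i, some _ :: bs => pvFree (i + 1) bs

-- the loop body of Source B: accumulator kept reversed (current run `runs[-1]` at the head), reversed at the end
def pvStep (runs : List (Int × Int)) (p : Int) : List (Int × Int) :=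
  match runs with
  | (s, l) :: t => if p = s + l then (s, l + 1) :: t else (p, 1) :: (s, l) :: t
  | [] => [(p, 1)]

def get_free_space_locations_alt (blocks : List (Option Int)) : List (Int × Int) :=
  ((pvFree 0 blocks).foldl pvStep []).reverse

-- ===== PRECONDITION & SPEC =====
def Spec_get_free_space_locations (blocks : List (Option Int)) (out : List (Int × Int)) : Prop := out = get_free_space_locations_alt blocks
instance (blocks : List (Option Int)) (out : List (Int × Int)) : Decidable (Spec_get_free_space_locations blocks out) := by unfold Spec_get_free_space_locations; infer_instance

-- ===== CLAIM (what is proved, stated in full; the proofs are below) =====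
def Claim_equal_get_free_space_locations : Prop := ∀ (blocks : List (Option Int)), Dom_get_free_space_locations blocks → Spec_get_free_space_locations blocks (get_free_space_locations blocks)

-- ===== LEMMAS AND PROOFS =====

-- recursive reading of B's loop (proof device only)
def pvRunsGo : List Int → Int → Int → List (Int × Int)
  | [], s, l => [(s, l)]
  | q :: qs, s, l => if q = s + l then pvRunsGo qs s (l + 1) else (s, l) :: pvRunsGo qs q 1

def pvRuns : List Int → List (Int × Int)
  | [] => []
  | p :: ps => pvRunsGo ps p 1

def pvSeq : Int → Nat → List Int
  | _, 0 => []
  | i, n + 1 => i :: pvSeq (i + 1) n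

theorem foldl_pvStep (ps : List Int) : ∀ (s l : Int) (acc : List (Int × Int)),
    (ps.foldl pvStep ((s, l) :: acc)).reverse = acc.reverse ++ pvRunsGo ps s l := by
  induction ps with
  | nil => intro s l acc; simp [pvRunsGo]
  | cons q qs ih =>
    intro s l acc
    by_cases h : q = s + l
    · simp [List.foldl_cons, pvStep, pvRunsGo, h, ih]
    · simp [List.foldl_cons, pvStep, pvRunsGo, h, ih ((q : Int)) 1 ((s, l) :: acc)]

theorem alt_eq_pvRuns (blocks : List (Option Int)) :
    get_free_space_locations_alt blocks = pvRuns (pvFree 0 blocks) := by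
  unfold get_free_space_locations_alt
  cases h : pvFree 0 blocks with
  | nil => simp [pvRuns]
  | cons p ps =>
    simp only [List.foldl_cons, pvStep, pvRuns]
    simpa using foldl_pvStep ps p 1 []

theorem pvFree_append (xs ys : List (Option Int)) : ∀ i : Int,
    pvFree i (xs ++ ys) = pvFree i xs ++ pvFree (i + xs.length) ys := by
  induction xs with
  | nil => intro i; simp [pvFree]
  | cons x xs ih =>
    intro i
    cases x <;> simp [pvFree, ih (i + 1)] <;> ring_nf
  -- note: the recursive offsets i+1+len vs i+(len+1) need `ring_nf`

theorem pvFree_ge {i : Int} {l : List (Option Int)} {x : Int} (h : x ∈ pvFree i l) : i ≤ x := by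
  induction l generalizing i with
  | nil => simp [pvFree] at h
  | cons b bs ih =>
    cases b with
    | none =>
      simp only [pvFree, List.mem_cons] at h
      rcases h with rfl | h
      · exact le_refl _
      · have := ih h; omega
    | some v =>
      have := ih (i := i + 1) (by simpa [pvFree] using h); omega

theorem pvFree_all_none {xs : List (Option Int)} (h : ∀ y ∈ xs, y = none) :
    ∀ i : Int, pvFree i xs = pvSeq i xs.length := by
  induction xs with
  | nil => intro i; simp [pvFree, pvSeq]
  | cons x xs ih =>
    intro i
    have hx : x = none := h x (by simp)
    subst hx
    simp [pvFree, pvSeq, ih (fun y hy => h y (by simp [hy]))]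

theorem pvFree_no_none {xs : List (Option Int)} (h : ∀ y ∈ xs, y ≠ none) :
    ∀ i : Int, pvFree i xs = [] := by
  induction xs with
  | nil => intro i; simp [pvFree]
  | cons x xs ih =>
    intro i
    cases x with
    | none => exact absurd rfl (h none (by simp))
    | some v => simp [pvFree, ih (fun y hy => h y (by simp [hy]))]

theorem pvRunsGo_seq (m : Nat) : ∀ (s l : Int) (rest : List Int),
    pvRunsGo (pvSeq (s + l) m ++ rest) s l = pvRunsGo rest s (l + m) := by
  induction m with
  | zero => intro s l rest; simp [pvSeq]
  | succ n ih =>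
    intro s l rest
    have : pvSeq (s + l) (n + 1) = (s + l) :: pvSeq (s + (l + 1)) n := by
      simp [pvSeq]; ring_nf
    rw [this]
    simp only [List.cons_append, pvRunsGo, ih s (l + 1) rest]
    push_cast; ring_nf

theorem pvRuns_seq (n : Nat) (hn : 1 ≤ n) (idx : Int) (tf : List Int)
    (htf : ∀ x ∈ tf, idx + n < x) :
    pvRuns (pvSeq idx n ++ tf) = (idx, (n : Int)) :: pvRuns tf := by
  obtain ⟨m, rfl⟩ : ∃ m, n = m + 1 := ⟨n - 1, by omega⟩
  have h1 : pvSeq idx (m + 1) = idx :: pvSeq (idx + 1) m := rfl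
  rw [h1]
  simp only [List.cons_append, pvRuns]
  have := pvRunsGo_seq m idx 1 tf
  rw [show idx + 1 = idx + (1 : Int) from rfl] at this
  rw [this]
  cases tf with
  | nil => simp [pvRunsGo]; ring
  | cons h t =>
    have hh : h ≠ idx + (1 + m) := by
      have := htf h (by simp)
      push_cast at this ⊢; omega
    simp only [pvRunsGo, if_neg hh]
    have h2 : (1 : Int) + (m : Int) = ((m + 1 : Nat) : Int) := by push_cast; ring
    rw [h2]

theorem main_eq (blocks : List (Option Int)) (idx : Int) :
    pvRuns (pvFree idx blocks) = get_free_space_locations.go blocks idx := by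
  induction blocks, idx using get_free_space_locations.go.induct with
  | case1 _ => simp [pvFree, pvRuns, get_free_space_locations.go]
  | case2 x xs index n ih =>
    have hsplit : x :: xs =
        (x :: xs.takeWhile (fun y => decide (y = x))) ++ xs.dropWhile (fun y => decide (y = x)) := by
      simp [List.takeWhile_append_dropWhile]
    have hgo : get_free_space_locations.go (x :: xs) index =
        (if x = none then [(index, (n : Int))] else []) ++
          get_free_space_locations.go (xs.dropWhile (fun y => decide (y = x))) (index + n) := by
      rw [get_free_space_locations.go]
    rw [hgo]
    conv_lhs => rw [hsplit]
    rw [pvFree_append]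
    have hlen : ((x :: xs.takeWhile (fun y => decide (y = x))).length : Int) = (n : Int) := by
      simp [n]; omega
    rw [hlen]
    cases x with
    | some v =>
      have hno : ∀ y ∈ some v :: xs.takeWhile (fun y => decide (y = some v)), y ≠ none := by
        intro y hy
        rcases List.mem_cons.mp hy with rfl | hy
        · simp
        · have := List.mem_takeWhile_imp hy
          simp only [decide_eq_true_eq] at this
          simp [this]
      rw [pvFree_no_none hno index]
      simp [ih]
    | none =>
      have hall : ∀ y ∈ (none : Option Int) :: xs.takeWhile (fun y => decide (y = none)), y = none := by
        intro y hy
        rcases List.mem_cons.mp hy with rfl | hy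
        · rfl
        · simpa using List.mem_takeWhile_imp hy
      rw [pvFree_all_none hall index]
      have hlen2 : ((none : Option Int) :: xs.takeWhile (fun y => decide (y = none))).length = n := by
        simp [n]; omega
      rw [hlen2]
      have htf : ∀ y ∈ pvFree (index + (n : Int)) (xs.dropWhile (fun y => decide (y = none))), index + (n : Int) < y := by
        intro y hy
        cases hdr : xs.dropWhile (fun y => decide (y = none)) with
        | nil => rw [hdr] at hy; simp [pvFree] at hy
        | cons d t =>
          have hd : d ≠ none := by
            have := List.head?_dropWhile_not (p := fun y => decide (y = none)) (l := xs)
            rw [hdr] at this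
            simpa using this
          rw [hdr] at hy
          obtain ⟨w, rfl⟩ := Option.ne_none_iff_exists'.mp hd
          have := pvFree_ge (by simpa [pvFree] using hy)
          omega
      rw [pvRuns_seq n (by simp [n]) index _ htf]
      simp [ih]

-- ===== VERDICT (by name: the statement is the Claim_ definition above) =====
theorem get_free_space_locations_spec : Claim_equal_get_free_space_locations := by
  intro blocks _
  unfold Spec_get_free_space_locations
  have h1 : get_free_space_locations blocks = get_free_space_locations.go blocks 0 := rfl
  rw [h1, ← main_eq blocks 0, alt_eq_pvRuns]
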